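-- pv_equiv track=rewrite | github.com/oskarholmberg/AdventOfCode | 2017/src/Day_9.py | remove_cancellations
-- ===== SOURCE A (Python) =====
-- def remove_cancellations(l):
--     new_list = []
--     i = 0
--     while i < len(l):
--         if l[i] == '!':
--             i += 1
--         else:
--             new_list.append(l[i])
--         i += 1
--     return new_list
-- ===== SOURCE B (Python) =====
-- def remove_cancellations(l):
--     # Run-parity characterization: a non-'!' element survives iff the maximal
--     # run of consecutive '!' immediately before it has even length (the '!'s
--     # in a run cancel each other pairwise; an odd run cancels the next element).
--     out = []
--     run = 0
--     for c in l:
--         if c == '!':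
--             run += 1
--         else:
--             if run % 2 == 0:
--                 out.append(c)
--             run = 0
--     return out
-- ===== Notes on version B (the rewrite author's own statement) =====
-- stated objective: alternative
-- what changed: B replaces A's skip-the-next-index while loop by a run-parity rule: one plain for-loop counts consecutive '!' and keeps a non-'!' element iff the '!'-run before it has even length, never skipping or consuming elements.
import Mathlib
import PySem

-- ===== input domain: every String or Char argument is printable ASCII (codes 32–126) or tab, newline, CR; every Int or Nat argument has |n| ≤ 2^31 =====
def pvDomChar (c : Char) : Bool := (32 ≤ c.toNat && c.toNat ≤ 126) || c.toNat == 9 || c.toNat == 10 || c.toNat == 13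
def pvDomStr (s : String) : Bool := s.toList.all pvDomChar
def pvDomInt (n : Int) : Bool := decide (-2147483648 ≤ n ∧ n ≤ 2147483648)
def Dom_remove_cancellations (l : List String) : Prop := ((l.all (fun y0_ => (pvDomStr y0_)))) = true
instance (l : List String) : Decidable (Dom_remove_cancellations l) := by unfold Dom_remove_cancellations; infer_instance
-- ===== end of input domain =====

-- B keeps a non-'!' element iff the '!'-run just before it has even length (run-parity rule), instead of A's skip-next index loop; same O(n) cost, different characterization.

-- ===== PORT A =====
-- A: while i < len(l): if l[i]=='!': i+=1 else: append l[i]; i+=1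
def removeCancellationsLoopA (l : List String) (i : Nat) (acc : List String) : List String :=
  if h : i < l.length then
    if l[i] = "!" then removeCancellationsLoopA l (i + 2) acc
    else removeCancellationsLoopA l (i + 1) (acc ++ [l[i]])
  else acc
termination_by l.length - i

def remove_cancellations (l : List String) : List String :=
  removeCancellationsLoopA l 0 []

-- ===== PORT B =====
-- B: fold over the list carrying (run of consecutive '!', output); a non-'!'
-- element is appended iff the current run is even; the run resets afterwards.
def remove_cancellations_alt (l : List String) : List String :=
  (l.foldl
    (fun (s : Nat × List String) c =>
      if c = "!" then (s.1 + 1, s.2)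
      else (0, if s.1 % 2 = 0 then s.2 ++ [c] else s.2))
    (0, [])).2

-- ===== PRECONDITION & SPEC =====
def Spec_remove_cancellations (l : List String) (out : List String) : Prop := out = remove_cancellations_alt l
instance (l : List String) (out : List String) : Decidable (Spec_remove_cancellations l out) := by unfold Spec_remove_cancellations; infer_instance

-- ===== CLAIM (what is proved, stated in full; the proofs are below) =====
def Claim_equal_remove_cancellations : Prop := ∀ (l : List String), Dom_remove_cancellations l → Spec_remove_cancellations l (remove_cancellations l)

-- ===== LEMMAS AND PROOFS =====

-- proof-side helper: the naive "skip the element after '!'" recursion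
def rcSkip : List String → List String
  | [] => []
  | x :: rest =>
    if x = "!" then
      match rest with
      | [] => []
      | _ :: t => rcSkip t
    else x :: rcSkip rest

-- proof-side helper: B's fold written as direct recursion on (run, list)
def gRun (run : Nat) : List String → List String
  | [] => []
  | c :: t =>
    if c = "!" then gRun (run + 1) t
    else if run % 2 = 0 then c :: gRun 0 t else gRun 0 t

theorem foldB_eq_gRun (l : List String) : ∀ (run : Nat) (acc : List String),
    (l.foldl
      (fun (s : Nat × List String) c =>
        if c = "!" then (s.1 + 1, s.2)
        else (0, if s.1 % 2 = 0 then s.2 ++ [c] else s.2))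
      (run, acc)).2 = acc ++ gRun run l := by
  induction l with
  | nil => intro run acc; simp [gRun]
  | cons c t ih =>
    intro run acc
    by_cases hc : c = "!"
    · simp [List.foldl, hc, gRun, ih]
    · by_cases hr : run % 2 = 0 <;> simp [List.foldl, hc, hr, gRun, ih]

theorem gRun_parity (l : List String) : ∀ (r : Nat), gRun (r + 2) l = gRun r l := by
  induction l with
  | nil => intro r; rfl
  | cons c t ih =>
    intro r
    by_cases hc : c = "!"
    · simp [gRun, hc]; exact ih (r + 1)
    · have h2 : (r + 2) % 2 = r % 2 := by omega
      simp [gRun, hc, h2]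

theorem gRun_one_cons (c : String) (t : List String) : gRun 1 (c :: t) = gRun 0 t := by
  by_cases hc : c = "!"
  · simp [gRun, hc]; exact gRun_parity t 0
  · simp [gRun, hc]

theorem gRun_eq_rcSkip (l : List String) :
    gRun 0 l = rcSkip l ∧ ∀ c, gRun 0 (c :: l) = rcSkip (c :: l) := by
  induction l with
  | nil =>
    refine ⟨rfl, fun c => ?_⟩
    by_cases hc : c = "!" <;> simp [gRun, hc, rcSkip]
  | cons x t ih =>
    refine ⟨ih.2 x, fun c => ?_⟩
    by_cases hc : c = "!"
    · rw [hc]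
      show gRun 0 ("!" :: x :: t) = rcSkip ("!" :: x :: t)
      have : gRun 0 ("!" :: x :: t) = gRun 1 (x :: t) := by simp [gRun]
      rw [this, gRun_one_cons, ih.1, rcSkip]
      simp
    · have h1 : gRun 0 (c :: x :: t) = c :: gRun 0 (x :: t) := by
        rw [gRun.eq_def]; simp [hc]
      have h2 : rcSkip (c :: x :: t) = c :: rcSkip (x :: t) := by
        rw [rcSkip.eq_def]; simp [hc]
      rw [h1, h2, ih.2 x]

theorem alt_eq_rcSkip (l : List String) : remove_cancellations_alt l = rcSkip l := by
  unfold remove_cancellations_alt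
  rw [foldB_eq_gRun l 0 []]
  simpa using (gRun_eq_rcSkip l).1

theorem rcSkip_drop_bang (l : List String) (i : Nat) (hi : i < l.length) (hb : l[i] = "!") :
    rcSkip (l.drop i) = rcSkip (l.drop (i + 2)) := by
  rw [List.drop_eq_getElem_cons hi, hb, rcSkip.eq_def]
  rcases h2 : l.drop (i + 1) with _ | ⟨y, t⟩
  · have h3 : l.drop (i + 2) = [] := by
      have := congrArg List.tail h2
      simpa [List.tail_drop] using this
    simp [h3, rcSkip.eq_def]
  · have h4 : l.drop (i + 2) = t := by
      have := congrArg List.tail h2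
      simpa [List.tail_drop] using this
    simp [h4]

theorem rcSkip_drop_keep (l : List String) (i : Nat) (hi : i < l.length) (hb : l[i] ≠ "!") :
    rcSkip (l.drop i) = l[i] :: rcSkip (l.drop (i + 1)) := by
  rw [List.drop_eq_getElem_cons hi, rcSkip.eq_def]
  simp [hb]

theorem loopA_eq (n : Nat) : ∀ (l : List String) (i : Nat) (acc : List String),
    l.length - i ≤ n →
    removeCancellationsLoopA l i acc = acc ++ rcSkip (l.drop i) := by
  induction n with
  | zero =>
    intro l i acc h
    have hni : ¬ i < l.length := by omega
    rw [removeCancellationsLoopA, dif_neg hni]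
    have : l.drop i = [] := List.drop_eq_nil_of_le (by omega)
    simp [this, rcSkip]
  | succ n ih =>
    intro l i acc h
    rw [removeCancellationsLoopA]
    by_cases hi : i < l.length
    · rw [dif_pos hi]
      by_cases hb : l[i] = "!"
      · rw [if_pos hb, ih l (i + 2) acc (by omega), rcSkip_drop_bang l i hi hb]
      · rw [if_neg hb, ih l (i + 1) (acc ++ [l[i]]) (by omega), rcSkip_drop_keep l i hi hb]
        simp
    · rw [dif_neg hi]
      have : l.drop i = [] := List.drop_eq_nil_of_le (by omega)
      simp [this, rcSkip]

-- ===== VERDICT (by name: the statement is the Claim_ definition above) =====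
theorem remove_cancellations_spec : Claim_equal_remove_cancellations := by
  intro l _
  show remove_cancellations l = remove_cancellations_alt l
  rw [alt_eq_rcSkip]
  have := loopA_eq l.length l 0 [] (by omega)
  simpa [remove_cancellations] using this
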